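-- pv_equiv track=rewrite | github.com/yeahzizi/algorithm | 프로그래머스/pccp/PR. pccp. 1회. 유전법칙.py | check
-- ===== SOURCE A (Python) =====
-- def check(x, y):
--     if x == 1:
--         return "Rr"
--     parent = check(x - 1, (y - 1) // 4 + 1)
--
--     if parent == "RR" or parent == "rr":
--         return parent
--     elif parent == "Rr":
--         if (y - 1) % 4 == 0:
--             return "RR"
--         elif (y - 1) % 4 == 1 or (y - 1) % 4 == 2:
--             return "Rr"
--         elif (y - 1) % 4 == 3:
--             return "rr"
-- ===== SOURCE B (Python) =====
-- def check(x, y):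
--     # Base-4 digits of y-1, LSD-first, exactly x-1 of them (leading zeros kept),
--     # then scan MSD-first: the first digit 0 fixes "RR", the first 3 fixes "rr",
--     # otherwise "Rr".  No recursion.
--     t = y - 1
--     digits = []
--     for _ in range(x - 1):
--         t, d = divmod(t, 4)
--         digits.append(d)
--     for d in reversed(digits):
--         if d == 0:
--             return "RR"
--         if d == 3:
--             return "rr"
--     return "Rr"
-- ===== Notes on version B (the rewrite author's own statement) =====
-- stated objective: alternative
-- what changed: Replaces the parent-passing recursion by an explicit base-4 digit expansion of y-1 padded to x-1 digits, scanned most-significant-first with an early exit on the first digit 0 (RR) or 3 (rr).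
import Mathlib
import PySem

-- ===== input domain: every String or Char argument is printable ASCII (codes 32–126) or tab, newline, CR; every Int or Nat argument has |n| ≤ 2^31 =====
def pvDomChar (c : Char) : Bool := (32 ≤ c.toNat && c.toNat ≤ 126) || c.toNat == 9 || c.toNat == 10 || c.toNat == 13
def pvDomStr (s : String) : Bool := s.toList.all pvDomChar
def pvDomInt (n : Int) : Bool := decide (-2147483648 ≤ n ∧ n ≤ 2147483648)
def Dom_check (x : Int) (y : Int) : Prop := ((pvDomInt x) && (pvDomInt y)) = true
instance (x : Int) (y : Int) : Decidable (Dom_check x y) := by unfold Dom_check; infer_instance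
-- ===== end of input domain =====

-- B replaces A's parent-passing recursion by an explicit base-4 digit expansion of y-1
-- (padded to x-1 digits) scanned most-significant-first (objective: alternative).

-- ===== PORT A =====
-- A recurses on x; fuel = x.toNat bounds the depth exactly (the recursion stops at x = 1).
def checkFuel : Nat → Int → Int → String
  | 0, _, _ => ""  -- fuel exhausted: unreachable when 1 ≤ x (Python: infinite recursion for x ≤ 0)
  | n + 1, x, y =>
    if x = 1 then "Rr"
    else
      let parent := checkFuel n (x - 1) (PySem.Int.floordiv (y - 1) 4 + 1)
      if parent = "RR" ∨ parent = "rr" then parent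
      else if parent = "Rr" then
        if PySem.Int.mod (y - 1) 4 = 0 then "RR"
        else if PySem.Int.mod (y - 1) 4 = 1 ∨ PySem.Int.mod (y - 1) 4 = 2 then "Rr"
        else if PySem.Int.mod (y - 1) 4 = 3 then "rr"
        else ""  -- Python falls through (None): unreachable, mod 4 ∈ {0,1,2,3}
      else ""    -- unreachable: parent ∈ {"RR","rr","Rr"}

def check (x : Int) (y : Int) : String := checkFuel x.toNat x y

-- ===== PORT B =====
-- Source B: second loop scans the reversed (MSD-first) digits with early exit
def scanB : List Int → String
  | [] => "Rr"
  | d :: rest => if d = 0 then "RR" else if d = 3 then "rr" else scanB rest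

-- the two Source B loops fused as in Source B's data flow: the append-loop builds LSD-first,
-- 'reversed(digits)' is realised by consing onto the accumulator (tail-recursive)
def digitsLoop (t : Int) (acc : List Int) : Nat → List Int
  | 0 => acc
  | n + 1 => digitsLoop (PySem.Int.floordiv t 4) (PySem.Int.mod t 4 :: acc) n

def check_alt (x : Int) (y : Int) : String := scanB (digitsLoop (y - 1) [] (x - 1).toNat)

-- ===== PRECONDITION & SPEC =====
-- Pre_ excludes only x ≤ 0, where A's recursion never reaches its base case (RecursionError).
def Pre_check (x : Int) (y : Int) : Prop := 1 ≤ x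
instance (x : Int) (y : Int) : Decidable (Pre_check x y) := by unfold Pre_check; infer_instance
def pvWitness_check : Int × Int := (3, 7)
def Spec_check (x : Int) (y : Int) (out : String) : Prop := out = check_alt x y
instance (x : Int) (y : Int) (out : String) : Decidable (Spec_check x y out) := by unfold Spec_check; infer_instance

-- ===== CLAIM (what is proved, stated in full; the proofs are below) =====
def Claim_equal_check : Prop := ∀ (x : Int) (y : Int), Dom_check x y → Pre_check x y → Spec_check x y (check x y)

-- ===== LEMMAS AND PROOFS =====

-- proof-side view of digitsLoop: the LSD-first digit list, built head-first
def digitsB (t : Int) : Nat → List Int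
  | 0 => []
  | n + 1 => PySem.Int.mod t 4 :: digitsB (PySem.Int.floordiv t 4) n

lemma scanB_range (l : List Int) : scanB l = "Rr" ∨ scanB l = "RR" ∨ scanB l = "rr" := by
  induction l with
  | nil => left; rfl
  | cons d rest ih =>
    simp only [scanB]
    split_ifs <;> simp [ih]

lemma scanB_append (l : List Int) (d : Int) :
    scanB (l ++ [d]) =
      (if scanB l = "RR" ∨ scanB l = "rr" then scanB l
       else if d = 0 then "RR" else if d = 3 then "rr" else "Rr") := by
  induction l with
  | nil => simp [scanB]
  | cons e rest ih =>
    by_cases h0 : e = 0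
    · simp [scanB, h0]
    · by_cases h3 : e = 3
      · simp [scanB, h3]
      · simp only [List.cons_append, scanB, if_neg h0, if_neg h3, ih]

lemma digitsLoop_eq (t : Int) (acc : List Int) (n : Nat) :
    digitsLoop t acc n = (digitsB t n).reverse ++ acc := by
  induction n generalizing t acc with
  | zero => simp [digitsLoop, digitsB]
  | succ n ih => simp [digitsLoop, digitsB, ih]

lemma checkFuel_eq_scan (n : Nat) : ∀ (y : Int),
    checkFuel (n + 1) ((n : Int) + 1) y = scanB (digitsB (y - 1) n).reverse := by
  induction n with
  | zero => intro y; simp [checkFuel, digitsB, scanB]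
  | succ n ih =>
    intro y
    have hx : ((n : Int) + 1 + 1) ≠ 1 := by omega
    have hm : PySem.Int.mod (y - 1) 4 = (y - 1) % 4 :=
      PySem.Int.mod_eq_emod_of_pos (by norm_num)
    have hmr : 0 ≤ (y - 1) % 4 ∧ (y - 1) % 4 < 4 :=
      ⟨Int.emod_nonneg _ (by norm_num), Int.emod_lt_of_pos _ (by norm_num)⟩
    have hrec : checkFuel (n + 1) ((n : Int) + 1 + 1 - 1) (PySem.Int.floordiv (y - 1) 4 + 1)
        = scanB (digitsB (PySem.Int.floordiv (y - 1) 4) n).reverse := by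
      have he : (n : Int) + 1 + 1 - 1 = (n : Int) + 1 := by ring
      rw [he, ih]
      norm_num
    have hgoal : checkFuel (n + 1 + 1) ((n : Int) + 1 + 1) y
        = scanB (digitsB (y - 1) (n + 1)).reverse := by
      rw [show digitsB (y - 1) (n + 1)
            = PySem.Int.mod (y - 1) 4 :: digitsB (PySem.Int.floordiv (y - 1) 4) n from rfl,
          List.reverse_cons, scanB_append]
      conv_lhs => rw [checkFuel]
      rw [if_neg hx, hrec]
      rcases scanB_range (digitsB (PySem.Int.floordiv (y - 1) 4) n).reverse with h | h | h <;>
        rw [h] <;> rw [hm] <;>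
        rcases (show (y - 1) % 4 = 0 ∨ (y - 1) % 4 = 1 ∨ (y - 1) % 4 = 2 ∨ (y - 1) % 4 = 3
          by omega) with h4 | h4 | h4 | h4 <;> rw [h4] <;> norm_num
    have hc : ((n + 1 : Nat) : Int) + 1 = (n : Int) + 1 + 1 := by push_cast; ring
    rw [hc, hgoal]

-- ===== VERDICT (by name: the statement is the Claim_ definition above) =====
theorem check_spec : Claim_equal_check := by
  intro x y _ hpre
  unfold Pre_check at hpre
  unfold Spec_check check check_alt
  obtain ⟨n, hn⟩ : ∃ n : Nat, x = (n : Int) + 1 := ⟨(x - 1).toNat, by omega⟩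
  subst hn
  rw [show ((n : Int) + 1).toNat = n + 1 from by omega,
      show ((n : Int) + 1 - 1).toNat = n from by omega,
      checkFuel_eq_scan, digitsLoop_eq, List.append_nil]
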